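-- pv_equiv track=rewrite | github.com/z3ero/Leetcode | z3ero_snippets/test.py | printEach
-- ===== SOURCE A (Python) =====
-- def printEach(matrix, row_len, col_len, start):
--     r_end = row_len - 1 - start
--     c_end = col_len - 1 - start
--     ll = []
--     # 第一步 竖打印总是需要的
--     ll += matrix[start][start:c_end + 1]
--     # 第二步 竖着打印只有 r_end > start 才被需要
--     if r_end > start:
--         for i in range(start + 1, r_end + 1):
--             ll.append(matrix[i][c_end])
--     # 第三步 反向横着打印 只有 r_end > start and c_end > start 才被需要
--     if r_end > start and c_end > start:
--         for i in range(c_end - 1, start - 1, -1):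
--             ll.append(matrix[r_end][i])
--     # 第四步 反向竖着打印 只有 r_end-1 > start and c_end > start 才被需要
--     if r_end - 1 > start and c_end > start:
--         for i in range(r_end - 1, start, -1):
--             ll.append(matrix[i][start])
--     return ll
-- ===== SOURCE B (Python) =====
-- def printEach(matrix, row_len, col_len, start):
--     top = left = start
--     bottom = row_len - 1 - start
--     right = col_len - 1 - start
--     if bottom <= top:
--         # collapsed layer: nothing below the top row, just slice it
--         return matrix[top][left:right + 1]
--     rows = bottom - top + 1
--     cols = right - left + 1
--     total = rows if cols == 1 else 2 * (rows + cols - 2)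
--     out = []
--     r, c = top, left
--     dr, dc = 0, 1
--     for _ in range(total):
--         out.append(matrix[r][c])
--         nr, nc = r + dr, c + dc
--         if nr < top or nr > bottom or nc < left or nc > right:
--             if dr == 0 and dc == 1:      # finished top row: turn down
--                 top += 1; dr, dc = 1, 0
--             elif dr == 1:                # finished right column: turn left
--                 right -= 1; dr, dc = 0, -1
--             elif dc == -1:               # finished bottom row: turn up
--                 bottom -= 1; dr, dc = -1, 0
--             else:                        # finished left column: turn right
--                 left += 1; dr, dc = 0, 1
--             nr, nc = r + dr, c + dc
--         r, c = nr, nc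
--     return out
-- ===== Notes on version B (the rewrite author's own statement) =====
-- stated objective: alternative
-- what changed: B replaces A's four hard-coded guarded edge segments by a generic direction-vector spiral walk: it computes the perimeter cell count, then runs one uniform loop that emits matrix[r][c], steps by (dr,dc), and turns right (tightening the just-finished bound) whenever the next step would leave the current bounds.
-- outside the precondition, e.g. on printEach([[5]], 0, 0, -1): A returns [5, 5, 5], B returns [5, 5, 5, 5]; on printEach([[1], [2, 9], [3, 4]], 3, 2, 0): A returns [1, 9, 4, 3, 2], B raises IndexError
import Mathlib
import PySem

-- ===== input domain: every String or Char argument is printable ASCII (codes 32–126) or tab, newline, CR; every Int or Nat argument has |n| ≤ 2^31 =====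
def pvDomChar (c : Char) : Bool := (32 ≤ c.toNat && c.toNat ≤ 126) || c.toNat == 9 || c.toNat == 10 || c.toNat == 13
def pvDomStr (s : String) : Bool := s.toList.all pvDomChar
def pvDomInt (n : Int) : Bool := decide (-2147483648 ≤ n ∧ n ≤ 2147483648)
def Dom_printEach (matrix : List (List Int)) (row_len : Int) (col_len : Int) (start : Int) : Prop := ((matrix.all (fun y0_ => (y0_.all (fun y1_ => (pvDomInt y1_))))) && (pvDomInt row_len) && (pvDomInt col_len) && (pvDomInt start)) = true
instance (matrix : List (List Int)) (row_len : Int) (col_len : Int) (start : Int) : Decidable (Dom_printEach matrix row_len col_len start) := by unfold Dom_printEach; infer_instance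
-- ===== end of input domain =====

-- B replaces A's four hard-coded edge segments by a generic direction-vector spiral walk
-- (step, and turn right when the next step would leave the current bounds); objective: alternative.

-- ===== PORT A =====
def printEach (matrix : List (List Int)) (row_len : Int) (col_len : Int) (start : Int) : List Int :=
  let r_end := row_len - 1 - start
  let c_end := col_len - 1 - start
  let ll : List Int := []
  -- matrix[start][start:c_end+1]  (IndexError on the row access is excluded by Pre_)
  let ll := ll ++ PySem.List.slice ((PySem.List.pyGet? matrix start).getD []) (some start) (some (c_end + 1))
  let ll := if r_end > start then
      (PySem.List.pyRange (start + 1) (r_end + 1) 1).foldl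
        (fun acc i => acc ++ [PySem.List.pyGetD ((PySem.List.pyGet? matrix i).getD []) c_end 0]) ll
    else ll
  let ll := if r_end > start ∧ c_end > start then
      (PySem.List.pyRange (c_end - 1) (start - 1) (-1)).foldl
        (fun acc i => acc ++ [PySem.List.pyGetD ((PySem.List.pyGet? matrix r_end).getD []) i 0]) ll
    else ll
  let ll := if r_end - 1 > start ∧ c_end > start then
      (PySem.List.pyRange (r_end - 1) start (-1)).foldl
        (fun acc i => acc ++ [PySem.List.pyGetD ((PySem.List.pyGet? matrix i).getD []) start 0]) ll
    else ll
  ll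

-- ===== PORT B =====
-- matrix[r][c] (in range on every input admitted by Pre_)
def cellAt (matrix : List (List Int)) (r c : Int) : Int :=
  PySem.List.pyGetD ((PySem.List.pyGet? matrix r).getD []) c 0

-- the walk of Source B's for-loop: one step per fuel unit, turning right at the current bounds
def spiralGo (matrix : List (List Int)) : Nat → Int → Int → Int → Int → Int → Int → Int → Int → List Int
  | 0, _, _, _, _, _, _, _, _ => []
  | n+1, r, c, dr, dc, top, bottom, left, right =>
    let cell := cellAt matrix r c
    let nr := r + dr
    let nc := c + dc
    if nr < top ∨ nr > bottom ∨ nc < left ∨ nc > right then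
      if dr = 0 ∧ dc = 1 then cell :: spiralGo matrix n (r+1) c 1 0 (top+1) bottom left right
      else if dr = 1 then cell :: spiralGo matrix n r (c-1) 0 (-1) top bottom left (right-1)
      else if dc = -1 then cell :: spiralGo matrix n (r-1) c (-1) 0 top (bottom-1) left right
      else cell :: spiralGo matrix n r (c+1) 0 1 top bottom (left+1) right
    else cell :: spiralGo matrix n nr nc dr dc top bottom left right

def printEach_alt (matrix : List (List Int)) (row_len : Int) (col_len : Int) (start : Int) : List Int :=
  let top := start
  let left := start
  let bottom := row_len - 1 - start
  let right := col_len - 1 - start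
  if bottom ≤ top then
    -- collapsed layer: matrix[top][left:right+1]
    PySem.List.slice ((PySem.List.pyGet? matrix top).getD []) (some left) (some (right + 1))
  else
    let rows := bottom - top + 1
    let cols := right - left + 1
    let total := if cols = 1 then rows else 2 * (rows + cols - 2)
    spiralGo matrix total.toNat top left 0 1 top bottom left right

-- ===== PRECONDITION & SPEC =====
-- Pre_ admits the degenerate inputs where the layer collapses to the single top slice
-- (r_end ≤ start with a valid row index) plus the natural domain (a genuinely
-- row_len × col_len rectangular matrix with a valid layer index); the remaining excluded
-- inputs are ones where A raises IndexError, or where row_len/col_len misdescribe the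
-- matrix's real shape so that A's clamped-slice / negative-index-wraparound value is an
-- accident of its implementation (see the cited examples).
def Pre_printEach (matrix : List (List Int)) (row_len : Int) (col_len : Int) (start : Int) : Prop :=
  (PySem.Raise.InRange matrix.length start ∧ row_len - 1 - start ≤ start) ∨
  ((matrix.length : Int) = row_len ∧ (∀ row ∈ matrix, (row.length : Int) = col_len) ∧
    0 ≤ start ∧ 2 * start ≤ row_len - 1 ∧ 2 * start ≤ col_len - 1)
instance (matrix : List (List Int)) (row_len : Int) (col_len : Int) (start : Int) : Decidable (Pre_printEach matrix row_len col_len start) := by unfold Pre_printEach; infer_instance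
def pvWitness_printEach : List (List Int) × Int × Int × Int := ([[1,2,3],[4,5,6],[7,8,9]], 3, 3, 0)

def Spec_printEach (matrix : List (List Int)) (row_len : Int) (col_len : Int) (start : Int) (out : List Int) : Prop := out = printEach_alt matrix row_len col_len start
instance (matrix : List (List Int)) (row_len : Int) (col_len : Int) (start : Int) (out : List Int) : Decidable (Spec_printEach matrix row_len col_len start out) := by unfold Spec_printEach; infer_instance

-- ===== CLAIM (what is proved, stated in full; the proofs are below) =====
def Claim_equal_printEach : Prop := ∀ (matrix : List (List Int)) (row_len : Int) (col_len : Int) (start : Int), Dom_printEach matrix row_len col_len start → Pre_printEach matrix row_len col_len start → Spec_printEach matrix row_len col_len start (printEach matrix row_len col_len start)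

-- ===== LEMMAS AND PROOFS =====

-- a range-indexed comprehension over a row is a slice of that row
lemma map_pyGetD_eq_slice (xs : List Int) (a b : Int) (h0 : 0 ≤ a) (hb0 : 0 ≤ b)
    (hb : b ≤ (xs.length : Int)) :
    (PySem.List.pyRange a b 1).map (fun j => PySem.List.pyGetD xs j 0) =
      PySem.List.slice xs (some a) (some b) := by
  rw [PySem.List.slice_toNat xs h0 hb0]
  apply List.ext_getElem
  · simp [PySem.List.length_pyRange_one]
    omega
  · intro k h1 h2
    simp only [List.getElem_map, PySem.List.getElem_pyRange_one, List.getElem_take,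
      List.getElem_drop]
    rw [PySem.List.pyGetD_eq_getElem]
    · congr 1
      simp [PySem.List.length_pyRange_one] at h1
      omega
    · omega
    · simp [PySem.List.length_pyRange_one] at h1
      omega

lemma run_right (m : List (List Int)) (k n : Nat) (r c top bottom left right : Int)
    (hk : c + k = right) (htr : top ≤ r) (hrb : r ≤ bottom) (hlc : left ≤ c) :
    spiralGo m (n + (k + 1)) r c 0 1 top bottom left right =
      (PySem.List.pyRange c (right + 1) 1).map (fun j => cellAt m r j) ++
        spiralGo m n (r + 1) right 1 0 (top + 1) bottom left right := by
  induction k generalizing c with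
  | zero =>
    obtain rfl : right = c := by omega
    show spiralGo m (n + 1) r right 0 1 top bottom left right = _
    rw [spiralGo]
    try simp only []
    rw [if_pos (by omega), if_pos (by norm_num), PySem.List.pyRange_one_singleton]
    simp
  | succ k ih =>
    rw [show n + (k + 1 + 1) = (n + (k + 1)) + 1 by omega, spiralGo]
    try simp only []
    rw [if_neg (by omega), PySem.List.pyRange_one_cons (by omega)]
    rw [show r + (0:Int) = r by ring]
    simp only [List.map_cons, List.cons_append]
    exact congrArg _ (ih (c + 1) (by omega) (by omega))

lemma run_down (m : List (List Int)) (k n : Nat) (r c top bottom left right : Int)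
    (hk : r + k = bottom) (htr : top ≤ r) (hlc : left ≤ c) (hcr : c ≤ right) :
    spiralGo m (n + (k + 1)) r c 1 0 top bottom left right =
      (PySem.List.pyRange r (bottom + 1) 1).map (fun i => cellAt m i c) ++
        spiralGo m n bottom (c - 1) 0 (-1) top bottom left (right - 1) := by
  induction k generalizing r with
  | zero =>
    obtain rfl : bottom = r := by omega
    show spiralGo m (n + 1) bottom c 1 0 top bottom left right = _
    rw [spiralGo]
    try simp only []
    rw [if_pos (by omega), if_neg (by norm_num), if_pos trivial,
      PySem.List.pyRange_one_singleton]
    simp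
  | succ k ih =>
    rw [show n + (k + 1 + 1) = (n + (k + 1)) + 1 by omega, spiralGo]
    try simp only []
    rw [if_neg (by omega), PySem.List.pyRange_one_cons (by omega)]
    rw [show c + (0:Int) = c by ring]
    simp only [List.map_cons, List.cons_append]
    exact congrArg _ (ih (r + 1) (by omega) (by omega))

lemma run_left (m : List (List Int)) (k n : Nat) (r c top bottom left right : Int)
    (hk : c - k = left) (htr : top ≤ r) (hrb : r ≤ bottom) (hcr : c ≤ right) :
    spiralGo m (n + (k + 1)) r c 0 (-1) top bottom left right =
      (PySem.List.pyRange c (left - 1) (-1)).map (fun j => cellAt m r j) ++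
        spiralGo m n (r - 1) left (-1) 0 top (bottom - 1) left right := by
  induction k generalizing c with
  | zero =>
    obtain rfl : left = c := by omega
    show spiralGo m (n + 1) r left 0 (-1) top bottom left right = _
    rw [spiralGo]
    try simp only []
    rw [if_pos (by omega), if_neg (by norm_num), if_neg (by norm_num), if_pos trivial,
      PySem.List.pyRange_neg_one_cons (by omega),
      PySem.List.pyRange_neg_one_eq_nil (by omega)]
    simp
  | succ k ih =>
    rw [show n + (k + 1 + 1) = (n + (k + 1)) + 1 by omega, spiralGo]
    try simp only []
    rw [if_neg (by omega), PySem.List.pyRange_neg_one_cons (by omega)]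
    rw [show c + (-1:Int) = c - 1 by ring, show r + (0:Int) = r by ring]
    simp only [List.map_cons, List.cons_append]
    exact congrArg _ (ih (c - 1) (by omega) (by omega))

lemma run_up (m : List (List Int)) (k n : Nat) (r c top bottom left right : Int)
    (hk : r - k = top) (hlc : left ≤ c) (hcr : c ≤ right) (hrb : r ≤ bottom) :
    spiralGo m (n + (k + 1)) r c (-1) 0 top bottom left right =
      (PySem.List.pyRange r (top - 1) (-1)).map (fun i => cellAt m i c) ++
        spiralGo m n top (c + 1) 0 1 top bottom (left + 1) right := by
  induction k generalizing r with
  | zero =>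
    obtain rfl : top = r := by omega
    show spiralGo m (n + 1) top c (-1) 0 top bottom left right = _
    rw [spiralGo]
    try simp only []
    rw [if_pos (by omega), if_neg (by norm_num), if_neg (by norm_num), if_neg (by norm_num),
      PySem.List.pyRange_neg_one_cons (by omega),
      PySem.List.pyRange_neg_one_eq_nil (by omega)]
    simp
  | succ k ih =>
    rw [show n + (k + 1 + 1) = (n + (k + 1)) + 1 by omega, spiralGo]
    try simp only []
    rw [if_neg (by omega), PySem.List.pyRange_neg_one_cons (by omega)]
    rw [show r + (-1:Int) = r - 1 by ring, show c + (0:Int) = c by ring]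
    simp only [List.map_cons, List.cons_append]
    exact congrArg _ (ih (r - 1) (by omega) (by omega))

-- ===== VERDICT (by name: the statement is the Claim_ definition above) =====
theorem printEach_spec : Claim_equal_printEach := by
  intro matrix row_len col_len start _hdom hpre
  unfold Spec_printEach
  by_cases hdeg : row_len - 1 - start ≤ start
  · -- collapsed layer: both programs produce the same slice of the top row
    unfold printEach printEach_alt
    try simp only []
    rw [if_neg (show ¬ row_len - 1 - start > start by omega),
      if_neg (show ¬ (row_len - 1 - start > start ∧ col_len - 1 - start > start) by omega),
      if_neg (show ¬ (row_len - 1 - start - 1 > start ∧ col_len - 1 - start > start) by omega),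
      if_pos hdeg]
    simp
  · -- a real layer: Pre_'s first disjunct is impossible, so the matrix is rectangular
    rcases hpre with ⟨_, hle⟩ | ⟨hrl, hrows, hs0, hr, hc⟩
    · omega
    obtain ⟨R, hRdef⟩ : ∃ R, R = row_len - 1 - start := ⟨_, rfl⟩
    obtain ⟨C, hCdef⟩ : ∃ C, C = col_len - 1 - start := ⟨_, rfl⟩
    have hlen : ∀ i : Int, 0 ≤ i → i < (matrix.length : Int) →
        (((PySem.List.pyGet? matrix i).getD []).length : Int) = col_len := by
      intro i hi0 hilt
      rw [PySem.List.pyGet?_eq_some_getElem matrix hi0 hilt]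
      exact hrows _ (List.getElem_mem _)
    have hRs : start < R := by omega
    have htop := hlen start hs0 (by omega)
    unfold printEach printEach_alt
    try simp only []
    rw [← hRdef, ← hCdef,
      if_pos (show R > start by omega),
      if_neg (show ¬ R ≤ start by omega),
      PySem.List.foldl_append_singleton_eq_map, List.nil_append]
    by_cases hC1 : C = start
    · -- single-column layer
      subst hC1
      rw [if_neg (show ¬ (R > C ∧ C > C) by omega),
        if_neg (show ¬ (R - 1 > C ∧ C > C) by omega),
        if_pos (show C - C + 1 = 1 by omega)]
      rw [show (R - C + 1).toNat = (0 + ((R - (C + 1)).toNat + 1)) + (0 + 1) by omega,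
        run_right matrix 0 (0 + ((R - (C+1)).toNat + 1)) C C C R C C
          (by omega) (le_refl _) (by omega) (le_refl _),
        run_down matrix ((R - (C + 1)).toNat) 0 (C + 1) C (C + 1) R C C (by omega)
          (le_refl _) (le_refl _) (le_refl _)]
      rw [spiralGo]
      rw [← map_pyGetD_eq_slice _ C (C + 1) hs0 (by omega) (by omega),
        PySem.List.pyRange_one_singleton]
      simp [cellAt, ← List.flatMap_def, ← List.map_eq_flatMap]
    · -- full layer: C > start
      have hCs : start < C := by omega
      rw [if_pos (show R > start ∧ C > start by omega),
        PySem.List.foldl_append_singleton_eq_map,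
        if_neg (show ¬ C - start + 1 = 1 by omega)]
      obtain ⟨a, hadef⟩ : ∃ a, a = (C - start).toNat := ⟨_, rfl⟩
      obtain ⟨b, hbdef⟩ : ∃ b, b = (R - start).toNat := ⟨_, rfl⟩
      have hk1 : start + (a : Int) = C := by omega
      have hk2 : start + 1 + ((b - 1 : Nat) : Int) = R := by omega
      have hk3 : C - 1 - ((a - 1 : Nat) : Int) = start := by omega
      have htot : (2 * (R - start + 1 + (C - start + 1) - 2)).toNat =
          ((b - 1 + ((a - 1) + 1)) + ((b - 1) + 1)) + (a + 1) := by omega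
      rw [htot,
        run_right matrix a _ start start start R start C hk1 (le_refl _)
          (by omega) (le_refl _),
        run_down matrix (b - 1) _ (start + 1) C (start + 1) R start C hk2
          (le_refl _) (by omega) (le_refl _),
        run_left matrix (a - 1) _ R (C - 1) (start + 1) R start (C - 1) hk3
          (by omega) (le_refl _) (le_refl _)]
      by_cases hb1 : b = 1
      · -- two-row layer: left segment empty on both sides
        rw [if_neg (show ¬ (R - 1 > start ∧ C > start) by omega)]
        rw [show b - 1 = 0 by omega, spiralGo]
        rw [← map_pyGetD_eq_slice _ start (C + 1) hs0 (by omega) (by omega)]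
        simp [cellAt, ← List.flatMap_def, ← List.map_eq_flatMap]
      · -- tall layer: run up the left column
        rw [if_pos (show R - 1 > start ∧ C > start by omega),
          PySem.List.foldl_append_singleton_eq_map,
          show b - 1 = 0 + ((b - 2) + 1) by omega,
          run_up matrix (b - 2) 0 (R - 1) start (start + 1) (R - 1) start (C - 1)
            (show (R - 1) - ((b - 2 : Nat) : Int) = start + 1 by omega) (le_refl _) (by omega) (le_refl _)]
        rw [spiralGo]
        rw [← map_pyGetD_eq_slice _ start (C + 1) hs0 (by omega) (by omega)]
        simp [cellAt]
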